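-- pv_equiv track=rewrite | github.com/SegMash/KQ8HebrewTranslation | fix_csv_linebreaks.py | is_complete_csv_line
-- ===== SOURCE A (Python) =====
-- def is_complete_csv_line(line):
--     """
--     Check if a line represents a complete CSV record.
--     A complete line should have:
--     - 10 commas (11 fields total)
--     - Balanced quotes (even number of quotes, or quotes properly closed)
--     """
--     # Count commas outside of quoted strings
--     in_quote = False
--     comma_count = 0
--     quote_count = 0
--
--     for char in line:
--         if char == '"':
--             quote_count += 1
--             in_quote = not in_quote
--         elif char == ',' and not in_quote:
--             comma_count += 1
--
--     # A complete CSV line should have: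
--     # 1. Exactly 10 commas (for 11 fields)
--     # 2. Even number of quotes (all quotes are balanced)
--     # 3. Not currently inside a quote
--     return comma_count == 10 and quote_count % 2 == 0 and not in_quote
-- ===== SOURCE B (Python) =====
-- def is_complete_csv_line(line):
--     parts = line.split('"')
--     commas = sum(p.count(',') for i, p in enumerate(parts) if i % 2 == 0)
--     return len(parts) % 2 == 1 and commas == 10
-- ===== Notes on version B (the rewrite author's own statement) =====
-- stated objective: faster
-- what changed: Replaced A's stateful character-by-character in_quote scan with a split-on-the-quote-character decomposition: quote parity comes from the number of segments and commas are counted only in the even-indexed (unquoted) segments, pushing all scanning into C-level str.split/str.count.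
import Mathlib
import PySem

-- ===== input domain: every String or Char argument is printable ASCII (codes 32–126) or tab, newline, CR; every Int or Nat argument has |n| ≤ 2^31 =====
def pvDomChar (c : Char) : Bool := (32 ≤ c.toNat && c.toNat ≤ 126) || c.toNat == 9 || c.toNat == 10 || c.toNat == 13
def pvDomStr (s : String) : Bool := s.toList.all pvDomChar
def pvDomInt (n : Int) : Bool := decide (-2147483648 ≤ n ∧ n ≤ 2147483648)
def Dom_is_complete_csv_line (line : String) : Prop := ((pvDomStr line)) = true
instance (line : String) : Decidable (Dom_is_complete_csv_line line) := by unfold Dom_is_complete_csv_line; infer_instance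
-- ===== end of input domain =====

-- B replaces A's stateful character-by-character in_quote loop by a split-on-the-quote-character
-- decomposition (commas counted in the even-indexed, i.e. unquoted, segments; quote parity =
-- segment-count parity); same O(n), measurably faster via C-level str.split/str.count.


-- ===== PORT A =====
-- the body of A's for-loop, one character step over the state (in_quote, comma_count, quote_count)
def pvStepA (st : Bool × Int × Int) (ch : Char) : Bool × Int × Int :=
  if ch == '"' then (!st.1, st.2.1, st.2.2 + 1)
  else if ch == ',' && !st.1 then (st.1, st.2.1 + 1, st.2.2)
  else st

def is_complete_csv_line (line : String) : Bool :=
  let st := line.toList.foldl pvStepA (false, 0, 0)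
  st.2.1 == 10 && PySem.Int.mod st.2.2 2 == 0 && !st.1

-- ===== PORT B =====
def is_complete_csv_line_alt (line : String) : Bool :=
  let parts := PySem.Chars.splitOn line.toList ['"']
  let commas := (((PySem.List.enumerate parts 0).filter
      (fun ip => PySem.Int.mod ip.1 2 == 0)).map
      (fun ip => (PySem.Chars.count ip.2 [','] : Int))).sum
  PySem.Int.mod (parts.length : Int) 2 == 1 && commas == 10

-- ===== PRECONDITION & SPEC =====
def Spec_is_complete_csv_line (line : String) (out : Bool) : Prop := out = is_complete_csv_line_alt line
instance (line : String) (out : Bool) : Decidable (Spec_is_complete_csv_line line out) := by unfold Spec_is_complete_csv_line; infer_instance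

-- ===== CLAIM (what is proved, stated in full; the proofs are below) =====
def Claim_equal_is_complete_csv_line : Prop := ∀ (line : String), Dom_is_complete_csv_line line → Spec_is_complete_csv_line line (is_complete_csv_line line)

-- ===== LEMMAS AND PROOFS =====

-- structural form of split-on-'"'
def splitCh : List Char → List (List Char)
  | [] => [[]]
  | c :: rest => if c = '"' then [] :: splitCh rest else (splitCh rest).modifyHead (fun p => c :: p)

-- comma counts of the parts at alternating positions, skipping those where q (in_quote) holds
def altCount : Bool → List (List Char) → Nat
  | _, [] => 0
  | q, p :: ps => (if q then 0 else p.count ',') + altCount (!q) ps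

lemma splitCh_ne_nil (cs : List Char) : splitCh cs ≠ [] := by
  cases cs with
  | nil => simp [splitCh]
  | cons c rest =>
    simp only [splitCh]
    split
    · simp
    · intro h
      have := splitCh_ne_nil rest
      cases hh : splitCh rest with
      | nil => exact this hh
      | cons a as => rw [hh] at h; simp at h

lemma splitCh_length_pos (cs : List Char) : 1 ≤ (splitCh cs).length :=
  List.length_pos_of_ne_nil (splitCh_ne_nil cs)

lemma countGo_comma (fuel : Nat) : ∀ (l : List Char) (acc : Nat), l.length ≤ fuel →
    PySem.Chars.count.go [','] fuel l acc = acc + l.count ',' := by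
  induction fuel with
  | zero =>
    intro l acc h
    have : l = [] := by cases l <;> simp_all
    subst this; simp [PySem.Chars.count.go]
  | succ n ih =>
    intro l acc h
    cases l with
    | nil => simp [PySem.Chars.count.go]
    | cons c rest =>
      simp only [PySem.Chars.count.go, List.isPrefixOf, Bool.and_true,
        List.length_cons] at *
      by_cases hc : c = ','
      · simp only [hc, beq_self_eq_true, if_true, List.length_nil, Nat.zero_add,
          List.drop_succ_cons, List.drop_zero]
        rw [ih rest (acc + 1) (by omega)]
        simp; omega
      · have hbe : (',' == c) = false := by simp [beq_eq_false_iff_ne]; exact fun e => hc e.symm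
        simp only [hbe]
        rw [ih rest acc (by omega)]
        simp [hc]

lemma count_comma (p : List Char) : PySem.Chars.count p [','] = p.count ',' := by
  simp only [PySem.Chars.count, List.isEmpty_cons, if_false, Bool.false_eq_true]
  rw [countGo_comma p.length p 0 (le_refl _)]; omega

lemma splitOnGo_eq (fuel : Nat) : ∀ (l cur : List Char) (acc : List (List Char)), l.length ≤ fuel →
    PySem.Chars.splitOn.go ['"'] fuel l cur acc
      = acc.reverse ++ (splitCh l).modifyHead (fun p => cur.reverse ++ p) := by
  induction fuel with
  | zero =>
    intro l cur acc h
    have : l = [] := by cases l <;> simp_all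
    subst this
    simp [PySem.Chars.splitOn.go, splitCh]
  | succ n ih =>
    intro l cur acc h
    cases l with
    | nil => simp [PySem.Chars.splitOn.go, splitCh]
    | cons c rest =>
      simp only [PySem.Chars.splitOn.go, List.isPrefixOf, Bool.and_true,
        List.length_cons] at *
      by_cases hc : c = '"'
      · simp only [hc, beq_self_eq_true, if_true, List.length_nil, Nat.zero_add,
          List.drop_succ_cons, List.drop_zero]
        rw [ih rest [] (cur.reverse :: acc) (by omega)]
        simp only [splitCh, if_true, List.reverse_cons, List.reverse_nil, List.nil_append,
          List.modifyHead_cons, List.append_assoc, List.cons_append, List.nil_append]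
        cases hh : splitCh rest with
        | nil => exact absurd hh (splitCh_ne_nil rest)
        | cons p ps => simp
      · have hbe : ('"' == c) = false := by simp [beq_eq_false_iff_ne]; exact fun e => hc e.symm
        simp only [hbe]
        rw [ih rest (c :: cur) acc (by omega)]
        simp only [splitCh, hc, if_false, List.reverse_cons]
        cases hh : splitCh rest with
        | nil => exact absurd hh (splitCh_ne_nil rest)
        | cons p ps => simp

lemma splitOn_eq_splitCh (cs : List Char) : PySem.Chars.splitOn cs ['"'] = splitCh cs := by
  unfold PySem.Chars.splitOn
  rw [splitOnGo_eq (cs.length + 1) cs [] [] (by omega)]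
  cases hh : splitCh cs with
  | nil => exact absurd hh (splitCh_ne_nil cs)
  | cons p ps => simp

lemma foldA_eq (cs : List Char) : ∀ (q : Bool) (c k : Int),
    cs.foldl pvStepA (q, c, k)
      = (if (splitCh cs).length % 2 = 1 then q else !q,
         c + (altCount q (splitCh cs) : Int),
         k + (((splitCh cs).length - 1 : Nat) : Int)) := by
  induction cs with
  | nil =>
    intro q c k
    simp [splitCh, altCount]
  | cons c₀ rest ih =>
    intro q c k
    have hpos := splitCh_length_pos rest
    by_cases hc : c₀ = '"'
    · simp only [List.foldl_cons, pvStepA, hc, beq_self_eq_true, if_true]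
      rw [ih (!q) c (k + 1)]
      simp only [splitCh, if_true, List.length_cons, altCount, Bool.not_not, List.count_nil,
        Prod.mk.injEq]
      refine ⟨?_, ?_, ?_⟩
      · rcases Nat.mod_two_eq_zero_or_one (splitCh rest).length with h | h <;>
          · have h2 : ((splitCh rest).length + 1) % 2 = 1 - (splitCh rest).length % 2 := by omega
            rw [h, h2]
            cases q <;> simp [h]
      · simp
      · omega
    · have hne : (c₀ == '"') = false := by simp [beq_eq_false_iff_ne, hc]
      simp only [List.foldl_cons, pvStepA, hne, Bool.false_eq_true, if_false]
      have hsplit : splitCh (c₀ :: rest) = (splitCh rest).modifyHead (fun p => c₀ :: p) := by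
        simp [splitCh, hc]
      obtain ⟨p, ps, hh⟩ : ∃ p ps, splitCh rest = p :: ps := by
        cases hhh : splitCh rest with
        | nil => exact absurd hhh (splitCh_ne_nil rest)
        | cons a as => exact ⟨a, as, rfl⟩
      cases q with
      | false =>
        by_cases hcm : c₀ = ','
        · have hb : (c₀ == ',' && !false) = true := by simp [hcm]
          simp only [hb, if_true]
          rw [ih false (c + 1) k]
          rw [hsplit, hh]
          simp only [List.modifyHead_cons, List.length_cons, altCount, Bool.not_false,
            if_false, Bool.false_eq_true, List.count_cons, hcm, beq_self_eq_true, if_true,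
            Prod.mk.injEq]
          refine ⟨by trivial, ?_, by trivial⟩
          push_cast
          ring
        · have hb : (c₀ == ',' && !false) = false := by simp [hcm]
          simp only [hb, Bool.false_eq_true, if_false]
          rw [ih false c k]
          rw [hsplit, hh]
          simp [altCount, hcm]
      | true =>
        have hb : (c₀ == ',' && !true) = false := by simp
        simp only [hb, Bool.false_eq_true, if_false]
        rw [ih true c k]
        rw [hsplit, hh]
        simp [altCount]

lemma enumSum (parts : List (List Char)) : ∀ (n : Nat),
    (((PySem.List.enumerate parts (n : Int)).filter
        (fun ip => PySem.Int.mod ip.1 2 == 0)).map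
        (fun ip => (PySem.Chars.count ip.2 [','] : Int))).sum
      = (altCount (n % 2 == 1) parts : Int) := by
  induction parts with
  | nil => intro n; simp [PySem.List.enumerate_nil, altCount]
  | cons p ps ih =>
    intro n
    rw [PySem.List.enumerate_cons]
    have hcast : (n : Int) + 1 = ((n + 1 : Nat) : Int) := by push_cast; ring
    have hmod : PySem.Int.mod (n : Int) 2 = ((n % 2 : Nat) : Int) := by
      exact_mod_cast PySem.Int.mod_natCast n 2
    rcases Nat.mod_two_eq_zero_or_one n with h | h
    · have hfilter : (PySem.Int.mod (n : Int) 2 == 0) = true := by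
        rw [hmod, h]; simp
      have h1 : (n + 1) % 2 = 1 := by omega
      simp only [List.filter_cons, hfilter, if_true, List.map_cons, List.sum_cons]
      rw [hcast, ih (n + 1)]
      simp [altCount, h, h1, count_comma]
      try push_cast
      try ring
    · have hfilter : (PySem.Int.mod (n : Int) 2 == 0) = false := by
        rw [hmod, h]; simp
      have h1 : (n + 1) % 2 = 0 := by omega
      simp only [List.filter_cons, hfilter, Bool.false_eq_true, if_false]
      rw [hcast, ih (n + 1)]
      simp [altCount, h, h1]

lemma enumSum0 (parts : List (List Char)) :
    (((PySem.List.enumerate parts 0).filter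
        (fun ip => PySem.Int.mod ip.1 2 == 0)).map
        (fun ip => (PySem.Chars.count ip.2 [','] : Int))).sum
      = (altCount false parts : Int) := by
  have := enumSum parts 0
  simpa using this

-- ===== VERDICT (by name: the statement is the Claim_ definition above) =====
theorem is_complete_csv_line_spec : Claim_equal_is_complete_csv_line := by
  intro line _
  unfold Spec_is_complete_csv_line is_complete_csv_line is_complete_csv_line_alt
  dsimp only
  rw [splitOn_eq_splitCh, foldA_eq, enumSum0]
  have hpos := splitCh_length_pos line.toList
  set L := (splitCh line.toList).length with hL
  set A := altCount false (splitCh line.toList) with hA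
  have hmodL : PySem.Int.mod (L : Int) 2 = ((L % 2 : Nat) : Int) := by
    exact_mod_cast PySem.Int.mod_natCast L 2
  have hmodL1 : PySem.Int.mod (0 + ((L - 1 : Nat) : Int)) 2 = (((L - 1) % 2 : Nat) : Int) := by
    rw [zero_add]; exact_mod_cast PySem.Int.mod_natCast (L - 1) 2
  rcases Nat.mod_two_eq_zero_or_one L with h | h
  · have h1 : (L - 1) % 2 = 1 := by omega
    simp only [hmodL, hmodL1, h, h1]
    simp
  · have h1 : (L - 1) % 2 = 0 := by omega
    simp only [hmodL, hmodL1, h, h1]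
    simp
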